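-- pv_equiv track=rewrite | github.com/HansBambel/AdventOfCode_2021 | day_08/day_08.py | count_1478
-- ===== SOURCE A (Python) =====
-- def count_1478(letter_lines) -> int:
--     output = [line.split("|")[1].strip().split(" ") for line in letter_lines]
--     # 1 needs 2 segments
--     # 4 needs 4 segments
--     # 7 needs 3 segments
--     # 8 needs 7 segments
--     counter = 0
--     for line in output:
--         for segment in line:
--             if len(segment) == 2:
--                 counter += 1
--             elif len(segment) == 4:
--                 counter += 1
--             elif len(segment) == 3:
--                 counter += 1
--             elif len(segment) == 7:
--                 counter += 1
--     return counter
-- ===== SOURCE B (Python) =====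
-- def count_1478(letter_lines) -> int:
--     total = 0
--     for line in letter_lines:
--         s = line.split("|")[1].strip()
--         run = 0
--         for ch in s:
--             if ch == " ":
--                 if run in (2, 3, 4, 7):
--                     total += 1
--                 run = 0
--             else:
--                 run += 1
--         if run in (2, 3, 4, 7):
--             total += 1
--     return total
-- ===== Notes on version B (the rewrite author's own statement) =====
-- stated objective: alternative
-- what changed: B never calls split(' ') and materializes no token lists: after the shared line.split('|')[1].strip(), it runs a character-level state machine over the stripped section, tracking the length of the current run between spaces and counting a run when it closes (or at end of line) with length 2, 3, 4 or 7, where A splits each line into tokens and tests each token's length against a four-branch conditional chain.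
import Mathlib
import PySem

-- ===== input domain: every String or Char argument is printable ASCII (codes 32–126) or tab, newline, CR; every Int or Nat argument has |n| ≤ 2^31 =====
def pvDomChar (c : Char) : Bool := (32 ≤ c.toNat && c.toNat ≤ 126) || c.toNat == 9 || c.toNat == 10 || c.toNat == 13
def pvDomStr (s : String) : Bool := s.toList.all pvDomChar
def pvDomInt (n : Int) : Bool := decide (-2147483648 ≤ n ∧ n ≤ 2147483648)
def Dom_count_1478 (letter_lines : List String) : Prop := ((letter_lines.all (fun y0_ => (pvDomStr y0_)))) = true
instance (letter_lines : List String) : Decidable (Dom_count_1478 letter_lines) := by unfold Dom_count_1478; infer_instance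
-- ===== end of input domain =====

-- B replaces A's split-into-token-lists pass by a character-level state machine over the stripped
-- output section (runs between spaces), materializing no token lists; same cost, different algorithm.

-- ===== PORT A =====
-- `line.split("|")[1].strip()`, shared by both Pythons verbatim (pyGetD is the total form of [1], exact under Pre_)
def pvPart (line : String) : String :=
  PySem.Str.strip (PySem.List.pyGetD ((PySem.Str.split? line "|").getD []) 1 "")

def count_1478 (letter_lines : List String) : Int :=
  let output := letter_lines.map (fun line => ((PySem.Str.split? (pvPart line) " ").getD []))
  output.foldl (fun counter line =>
    line.foldl (fun counter segment =>
      if PySem.Str.len segment = 2 then counter + 1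
      else if PySem.Str.len segment = 4 then counter + 1
      else if PySem.Str.len segment = 3 then counter + 1
      else if PySem.Str.len segment = 7 then counter + 1
      else counter) counter) 0

-- ===== PORT B =====
def count_1478_alt (letter_lines : List String) : Int :=
  letter_lines.foldl (fun total line =>
    let p := (pvPart line).toList.foldl (fun (tr : Int × Int) ch =>
        if ch = ' ' then
          ((if tr.2 = 2 ∨ tr.2 = 3 ∨ tr.2 = 4 ∨ tr.2 = 7 then tr.1 + 1 else tr.1), 0)
        else (tr.1, tr.2 + 1)) (total, 0)
    if p.2 = 2 ∨ p.2 = 3 ∨ p.2 = 4 ∨ p.2 = 7 then p.1 + 1 else p.1) 0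

-- ===== PRECONDITION & SPEC =====
-- Pre_ excludes exactly the lines without a "|": there `line.split("|")[1]` raises IndexError in Python (in A and in B alike).
def Pre_count_1478 (letter_lines : List String) : Prop :=
  (letter_lines.all (fun line =>
    2 ≤ ((PySem.Str.split? line "|").getD []).length)) = true
instance (letter_lines : List String) : Decidable (Pre_count_1478 letter_lines) := by
  unfold Pre_count_1478; infer_instance
def pvWitness_count_1478 : List String := ["ab cde | f gh ijkl abcdefg"]
def Spec_count_1478 (letter_lines : List String) (out : Int) : Prop := out = count_1478_alt letter_lines
instance (letter_lines : List String) (out : Int) : Decidable (Spec_count_1478 letter_lines out) := by unfold Spec_count_1478; infer_instance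

-- ===== CLAIM (what is proved, stated in full; the proofs are below) =====
def Claim_equal_count_1478 : Prop := ∀ (letter_lines : List String), Dom_count_1478 letter_lines → Pre_count_1478 letter_lines → Spec_count_1478 letter_lines (count_1478 letter_lines)

-- ===== LEMMAS AND PROOFS =====

-- structural characterization of splitting on a single space
def pvSp : List Char → List (List Char)
  | [] => [[]]
  | c :: r => if c = ' ' then [] :: pvSp r else
      match pvSp r with
      | [] => [[c]]
      | t :: ts => (c :: t) :: ts

theorem pvSp_ne_nil (cs : List Char) : pvSp cs ≠ [] := by
  cases cs with
  | nil => simp [pvSp]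
  | cons c r =>
    simp only [pvSp]; split
    · simp
    · split <;> simp

theorem pvGo_eq (fuel : Nat) : ∀ (l cur : List Char) (accs : List (List Char)), l.length < fuel →
    PySem.Chars.splitOn.go [' '] fuel l cur accs =
      accs.reverse ++ (match pvSp l with
        | [] => []
        | t :: ts => (cur.reverse ++ t) :: ts) := by
  induction fuel with
  | zero => intro l cur accs h; omega
  | succ n ih =>
    intro l cur accs h
    cases l with
    | nil =>
      unfold PySem.Chars.splitOn.go
      simp [pvSp]
    | cons c rest =>
      unfold PySem.Chars.splitOn.go
      by_cases hc : c = ' '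
      · subst hc
        simp only [List.isPrefixOf, Bool.and_true, beq_self_eq_true,
          if_pos, List.length_cons, List.length_nil, List.drop_succ_cons, List.drop_zero,
          Nat.zero_add]
        rw [ih rest [] (cur.reverse :: accs) (by simp at h; omega)]
        cases hsp : pvSp rest with
        | nil => exact absurd hsp (pvSp_ne_nil rest)
        | cons t ts => simp [pvSp, hsp]
      · have hpre : List.isPrefixOf [' '] (c :: rest) = false := by
          simp [List.isPrefixOf, Ne.symm hc]
        simp only [hpre, Bool.false_eq_true, if_false]
        rw [ih rest (c :: cur) accs (by simp at h; omega)]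
        cases hsp : pvSp rest with
        | nil => exact absurd hsp (pvSp_ne_nil rest)
        | cons t ts => simp [pvSp, hc, hsp]

theorem pvSplitOn_space (cs : List Char) : PySem.Chars.splitOn cs [' '] = pvSp cs := by
  rw [PySem.Chars.splitOn, pvGo_eq (cs.length + 1) cs [] [] (by omega)]
  cases h : pvSp cs with
  | nil => exact absurd h (pvSp_ne_nil cs)
  | cons t ts => simp

-- 1 if a run of that length is counted, else 0
def pvInd (n : Int) : Int := if n = 2 ∨ n = 3 ∨ n = 4 ∨ n = 7 then 1 else 0

-- sum of pvInd over token lengths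
def pvSum : List (List Char) → Int
  | [] => 0
  | t :: ts => pvInd t.length + pvSum ts

theorem pvSum_eq (L : List (List Char)) :
    (L.map (fun u => pvInd (u.length : Int))).sum = pvSum L := by
  induction L with
  | nil => rfl
  | cons t ts ih => simp [pvSum, ih]

-- A's per-token sum over the tail tokens plus the still-open first token of length r + (head length)
def pvS (r : Int) : List (List Char) → Int
  | [] => 0
  | t :: ts => pvInd (r + t.length) + pvSum ts

-- A's inner loop counts pvInd per token
theorem pvAInner (ts : List String) (c : Int) :
    ts.foldl (fun counter segment =>
      if PySem.Str.len segment = 2 then counter + 1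
      else if PySem.Str.len segment = 4 then counter + 1
      else if PySem.Str.len segment = 3 then counter + 1
      else if PySem.Str.len segment = 7 then counter + 1
      else counter) c
    = c + (ts.map (fun t => pvInd (PySem.Str.len t))).sum := by
  induction ts generalizing c with
  | nil => simp
  | cons t ts ih =>
    simp only [List.foldl_cons, List.map_cons, List.sum_cons, ih]
    unfold pvInd
    split_ifs <;> simp_all <;> omega

-- B's scanner computes pvS of the single-space split
theorem pvBScan (cs : List Char) : ∀ (t r : Int),
    (if (cs.foldl (fun (tr : Int × Int) ch =>
        if ch = ' ' then
          ((if tr.2 = 2 ∨ tr.2 = 3 ∨ tr.2 = 4 ∨ tr.2 = 7 then tr.1 + 1 else tr.1), 0)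
        else (tr.1, tr.2 + 1)) (t, r)).2 = 2 ∨
        (cs.foldl (fun (tr : Int × Int) ch =>
        if ch = ' ' then
          ((if tr.2 = 2 ∨ tr.2 = 3 ∨ tr.2 = 4 ∨ tr.2 = 7 then tr.1 + 1 else tr.1), 0)
        else (tr.1, tr.2 + 1)) (t, r)).2 = 3 ∨
        (cs.foldl (fun (tr : Int × Int) ch =>
        if ch = ' ' then
          ((if tr.2 = 2 ∨ tr.2 = 3 ∨ tr.2 = 4 ∨ tr.2 = 7 then tr.1 + 1 else tr.1), 0)
        else (tr.1, tr.2 + 1)) (t, r)).2 = 4 ∨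
        (cs.foldl (fun (tr : Int × Int) ch =>
        if ch = ' ' then
          ((if tr.2 = 2 ∨ tr.2 = 3 ∨ tr.2 = 4 ∨ tr.2 = 7 then tr.1 + 1 else tr.1), 0)
        else (tr.1, tr.2 + 1)) (t, r)).2 = 7 then
      (cs.foldl (fun (tr : Int × Int) ch =>
        if ch = ' ' then
          ((if tr.2 = 2 ∨ tr.2 = 3 ∨ tr.2 = 4 ∨ tr.2 = 7 then tr.1 + 1 else tr.1), 0)
        else (tr.1, tr.2 + 1)) (t, r)).1 + 1
    else
      (cs.foldl (fun (tr : Int × Int) ch =>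
        if ch = ' ' then
          ((if tr.2 = 2 ∨ tr.2 = 3 ∨ tr.2 = 4 ∨ tr.2 = 7 then tr.1 + 1 else tr.1), 0)
        else (tr.1, tr.2 + 1)) (t, r)).1)
    = t + pvS r (pvSp cs) := by
  induction cs with
  | nil =>
    intro t r
    simp only [List.foldl_nil, pvSp, pvS]
    simp only [pvSum, pvInd, List.length_nil, Int.natCast_zero, add_zero]
    split_ifs <;> omega
  | cons c rest ih =>
    intro t r
    by_cases hc : c = ' '
    · subst hc
      simp only [List.foldl_cons, ite_true, ih]
      cases hsp : pvSp rest with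
      | nil => exact absurd hsp (pvSp_ne_nil rest)
      | cons u us =>
        simp [pvSp, hsp, pvS, pvSum, pvInd]
        split_ifs <;> omega
    · simp only [List.foldl_cons, if_neg hc, ih]
      cases hsp : pvSp rest with
      | nil => exact absurd hsp (pvSp_ne_nil rest)
      | cons u us =>
        simp [pvSp, hc, hsp, pvS, pvInd]
        split_ifs <;> omega

-- A's per-line token sum equals pvS 0 of the single-space split
theorem pvMapSum (s : String) :
    (((PySem.Str.split? s " ").getD []).map (fun u => pvInd (PySem.Str.len u))).sum
      = pvS 0 (pvSp s.toList) := by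
  have hsep : (" " : String).toList = [' '] := rfl
  have hsplit : PySem.Str.split? s " " =
      some ((pvSp s.toList).map String.ofList) := by
    rw [PySem.Str.split?, hsep, PySem.Chars.split?, pvSplitOn_space]
    simp
  rw [hsplit, Option.getD_some]
  cases h : pvSp s.toList with
  | nil => exact absurd h (pvSp_ne_nil _)
  | cons u us =>
    simp only [List.map_map, Function.comp_def, PySem.Str.len_eq, String.toList_ofList]
    rw [pvSum_eq]
    simp only [pvS, pvSum, pvInd, zero_add]

-- one line: A's token loop and B's character scanner add the same amount
theorem pvStep (c : Int) (line : String) :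
    ((PySem.Str.split? (pvPart line) " ").getD []).foldl (fun counter segment =>
      if PySem.Str.len segment = 2 then counter + 1
      else if PySem.Str.len segment = 4 then counter + 1
      else if PySem.Str.len segment = 3 then counter + 1
      else if PySem.Str.len segment = 7 then counter + 1
      else counter) c
    = (let p := (pvPart line).toList.foldl (fun (tr : Int × Int) ch =>
          if ch = ' ' then
            ((if tr.2 = 2 ∨ tr.2 = 3 ∨ tr.2 = 4 ∨ tr.2 = 7 then tr.1 + 1 else tr.1), 0)
          else (tr.1, tr.2 + 1)) (c, 0)
       if p.2 = 2 ∨ p.2 = 3 ∨ p.2 = 4 ∨ p.2 = 7 then p.1 + 1 else p.1) := by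
  show _ = if _ then _ else _
  rw [pvAInner, pvBScan, pvMapSum]

-- outer loop: both programs advance the same accumulator line by line
theorem pvMain (lines : List String) : ∀ (c : Int),
    lines.foldl (fun counter line =>
      (((PySem.Str.split? (pvPart line) " ").getD []).foldl (fun counter segment =>
        if PySem.Str.len segment = 2 then counter + 1
        else if PySem.Str.len segment = 4 then counter + 1
        else if PySem.Str.len segment = 3 then counter + 1
        else if PySem.Str.len segment = 7 then counter + 1
        else counter) counter)) c
    = lines.foldl (fun total line =>
        let p := (pvPart line).toList.foldl (fun (tr : Int × Int) ch =>
            if ch = ' ' then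
              ((if tr.2 = 2 ∨ tr.2 = 3 ∨ tr.2 = 4 ∨ tr.2 = 7 then tr.1 + 1 else tr.1), 0)
            else (tr.1, tr.2 + 1)) (total, 0)
        if p.2 = 2 ∨ p.2 = 3 ∨ p.2 = 4 ∨ p.2 = 7 then p.1 + 1 else p.1) c := by
  intro c
  simp only [pvStep]
-- ===== VERDICT (by name: the statement is the Claim_ definition above) =====
theorem count_1478_spec : Claim_equal_count_1478 := by
  intro letter_lines _ _
  unfold Spec_count_1478 count_1478 count_1478_alt
  simp only [List.foldl_map]
  exact pvMain letter_lines 0
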